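-- pv_equiv track=rewrite | github.com/swjungle4a-algorithm/algorithm_study | jack/lv1/[1차] 비밀지도.py | solution
-- ===== SOURCE A (Python) =====
-- def solution(n, arr1, arr2):
--     answer = []
--     arr = [i | j for i,j in zip(arr1,arr2)]
--     for i in arr :
--         s = ""
--         for j in range(n) :
--             s += "#" if i & (1 << (n-j-1)) else " "
--         answer.append(s)
--     return answer
-- ===== SOURCE B (Python) =====
-- def solution(n, arr1, arr2):
--     # Width <= 0: every row is empty (and 1 << n would be invalid for n < 0).
--     if n <= 0:
--         return ['' for _ in zip(arr1, arr2)]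
--     mask = (1 << n) - 1
--     table = str.maketrans('10', '# ')
--     return [format((a | b) & mask, '0{}b'.format(n)).translate(table)
--             for a, b in zip(arr1, arr2)]
-- ===== Notes on version B (the rewrite author's own statement) =====
-- stated objective: faster
-- what changed: B replaces A's per-bit inner loop (probing each position with a shifted mask and concatenating one character at a time) by whole-value binary formatting: mask the OR'd value to the low n bits, render it with format(v, '0{n}b') as one zero-padded binary string, and map '1'/'0' to '#'/' ' with str.translate.
import Mathlib
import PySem

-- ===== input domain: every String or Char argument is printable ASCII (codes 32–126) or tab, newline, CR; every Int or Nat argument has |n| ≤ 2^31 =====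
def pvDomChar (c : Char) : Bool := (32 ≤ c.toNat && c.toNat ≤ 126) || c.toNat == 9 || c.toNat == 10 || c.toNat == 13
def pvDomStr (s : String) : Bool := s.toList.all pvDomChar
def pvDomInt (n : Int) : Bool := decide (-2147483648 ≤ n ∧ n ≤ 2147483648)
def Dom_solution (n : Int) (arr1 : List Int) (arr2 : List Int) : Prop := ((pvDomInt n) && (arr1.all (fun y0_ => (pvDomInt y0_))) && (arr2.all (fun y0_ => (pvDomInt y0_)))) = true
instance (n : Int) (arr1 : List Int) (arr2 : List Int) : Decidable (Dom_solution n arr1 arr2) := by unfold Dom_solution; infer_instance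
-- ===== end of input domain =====

-- B renders each row at once — mask the OR'd value to its low n bits, format it as one
-- zero-padded binary string, translate '1'/'0' to '#'/' ' — instead of A's per-bit inner loop.

-- ===== PORT A =====
-- inner loop 'for j in range(n): s += "#" if i & (1 << (n-j-1)) else " "';
-- the shift amount n-j-1 is ≥ 0 for every j that range(n) produces, so '.toNat' is exact there
def pvRowA (n : Int) (i : Int) : String :=
  (PySem.List.pyRange 0 n 1).foldl
    (fun s j => s ++ (if PySem.Int.band i ((1 : Int) <<< (n - j - 1).toNat) ≠ 0 then "#" else " "))
    ""

def solution (n : Int) (arr1 : List Int) (arr2 : List Int) : List String :=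
  ((arr1.zip arr2).map (fun p => PySem.Int.bor p.1 p.2)).foldl
    (fun answer i => answer ++ [pvRowA n i]) []

-- ===== PORT B =====
-- hand-port of format(m, 'b') for a NONNEGATIVE m (exact there): low-bit-first digits by
-- repeated %2 and /2, reversed; '0' for m = 0
def pvBinRev : Nat → List Char
  | 0 => []
  | (m+1) => (if (m+1) % 2 = 1 then '1' else '0') :: pvBinRev ((m+1)/2)
decreasing_by exact Nat.div_lt_self (Nat.succ_pos m) (by norm_num)

-- format(m, '0{width}b') for nonnegative m: left-pad the digits with '0' to 'width' (exact there)
def pvFormatBin (width : Nat) (m : Nat) : List Char :=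
  let digits := if m = 0 then ['0'] else (pvBinRev m).reverse
  List.replicate (width - digits.length) '0' ++ digits

-- str.maketrans('10', '# ') applied to one character
def pvTr (c : Char) : Char := if c = '1' then '#' else if c = '0' then ' ' else c

def solution_alt (n : Int) (arr1 : List Int) (arr2 : List Int) : List String :=
  if n ≤ 0 then (arr1.zip arr2).map (fun _ => "")
  else
    let mask : Int := (1 : Int) <<< n.toNat - 1
    -- '(a | b) & mask' is nonnegative (mask ≥ 0), so '.toNat' is exact for the format call
    (arr1.zip arr2).map (fun p =>
      String.ofList ((pvFormatBin n.toNat (PySem.Int.band (PySem.Int.bor p.1 p.2) mask).toNat).map pvTr))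

-- ===== PRECONDITION & SPEC =====
def Spec_solution (n : Int) (arr1 : List Int) (arr2 : List Int) (out : List String) : Prop := out = solution_alt n arr1 arr2
instance (n : Int) (arr1 : List Int) (arr2 : List Int) (out : List String) : Decidable (Spec_solution n arr1 arr2 out) := by unfold Spec_solution; infer_instance

-- ===== CLAIM (what is proved, stated in full; the proofs are below) =====
def Claim_equal_solution : Prop := ∀ (n : Int) (arr1 : List Int) (arr2 : List Int), Dom_solution n arr1 arr2 → Spec_solution n arr1 arr2 (solution n arr1 arr2)

-- ===== LEMMAS AND PROOFS =====

theorem pv_shl_one (k : Nat) : (1 : Int) <<< k = ((2 ^ k : Nat) : Int) := by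
  simp [Int.shiftLeft_eq]

-- the single bit fact: testing bit e+1 of v is testing bit e of v >> 1 (Python two's-complement ints)
theorem pv_bit_succ (v : Int) (e : Nat) :
    (PySem.Int.band v ((1 : Int) <<< (e + 1)) ≠ 0) ↔
    (PySem.Int.band (v >>> (1 : Nat)) ((1 : Int) <<< e) ≠ 0) := by
  rw [pv_shl_one, pv_shl_one]
  cases v with
  | ofNat m =>
      have hsr : ((m : Nat) : Int) >>> (1 : Nat) = ((m >>> 1 : Nat) : Int) := rfl
      simp only [Int.ofNat_eq_natCast]
      rw [hsr, PySem.Int.band_natCast, PySem.Int.band_natCast,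
          Nat.and_two_pow, Nat.and_two_pow, Nat.testBit_shiftRight, Nat.add_comm 1 e]
      cases m.testBit (e + 1) <;> simp
  | negSucc m =>
      have hsr : (Int.negSucc m) >>> (1 : Nat) = Int.negSucc (m >>> 1) := rfl
      have h1 : ¬ (0 : Int) ≤ Int.negSucc m := by omega
      have h2 : ¬ (0 : Int) ≤ Int.negSucc (m >>> 1) := by omega
      have e1 : (-(Int.negSucc m) - 1).toNat = m := by omega
      have e2 : (-(Int.negSucc (m >>> 1)) - 1).toNat = m >>> 1 := by omega
      rw [hsr]
      simp only [PySem.Int.band]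
      rw [if_neg h1, if_neg h2, if_pos (Int.natCast_nonneg (2 ^ (e + 1))),
          if_pos (Int.natCast_nonneg (2 ^ e))]
      simp only [Int.toNat_natCast, e1, e2]
      rw [Nat.two_pow_and, Nat.two_pow_and, Nat.testBit_shiftRight, Nat.add_comm 1 e]
      cases m.testBit (e + 1) <;> simp

-- A's row, one width step: peel the LAST inner iteration (exponent 0) off
theorem pv_rowA_succ (k : Nat) (v : Int) :
    pvRowA ((k : Int) + 1) v =
      pvRowA (k : Int) (v >>> (1 : Nat)) ++ (if PySem.Int.band v 1 ≠ 0 then "#" else " ") := by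
  unfold pvRowA
  rw [PySem.List.pyRange_one_succ_right (by positivity : (0 : Int) ≤ (k : Int))]
  rw [List.foldl_append]
  have hlast : ((k : Int) + 1 - (k : Int) - 1).toNat = 0 := by omega
  have hcongr :
      (PySem.List.pyRange 0 (k : Int) 1).foldl
        (fun s j => s ++ (if PySem.Int.band v ((1 : Int) <<< ((k : Int) + 1 - j - 1).toNat) ≠ 0 then "#" else " ")) "" =
      (PySem.List.pyRange 0 (k : Int) 1).foldl
        (fun s j => s ++ (if PySem.Int.band (v >>> (1 : Nat)) ((1 : Int) <<< ((k : Int) - j - 1).toNat) ≠ 0 then "#" else " ")) "" := by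
    apply PySem.List.foldl_congr_mem
    intro acc j hj
    rw [PySem.List.mem_pyRange_one] at hj
    have he : ((k : Int) + 1 - j - 1).toNat = ((k : Int) - j - 1).toNat + 1 := by omega
    rw [he]
    have := pv_bit_succ v ((k : Int) - j - 1).toNat
    by_cases hb : PySem.Int.band v ((1 : Int) <<< (((k : Int) - j - 1).toNat + 1)) ≠ 0
    · rw [if_pos hb, if_pos (this.mp hb)]
    · rw [if_neg hb, if_neg (fun h => hb (this.mpr h))]
  simp only [List.foldl_cons, List.foldl_nil, hlast]
  rw [hcongr]
  rfl

-- '(a | b) & ((1 << k) - 1)' IS 'v mod 2^k' on Python's two's-complement ints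
theorem pv_band_mask (k : Nat) (v : Int) :
    PySem.Int.band v ((1 : Int) <<< k - 1) = v % ((2 : Int) ^ k) := by
  have h2 : (2 : Int) ^ k = ((2 ^ k : Nat) : Int) := by push_cast; rfl
  have hm : ((1 : Int) <<< k - 1) = (((2 ^ k - 1 : Nat)) : Int) := by
    rw [pv_shl_one]
    have : 1 ≤ 2 ^ k := Nat.one_le_two_pow
    push_cast [this]; ring
  rw [hm]
  cases v with
  | ofNat m =>
      simp only [Int.ofNat_eq_natCast]
      rw [PySem.Int.band_natCast, Nat.and_two_pow_sub_one_eq_mod]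
      rw [h2]; push_cast; rfl
  | negSucc m =>
      have h1 : ¬ (0 : Int) ≤ Int.negSucc m := by omega
      have e1 : (-(Int.negSucc m) - 1).toNat = m := by omega
      simp only [PySem.Int.band]
      rw [if_neg h1, if_pos (Int.natCast_nonneg _)]
      simp only [Int.toNat_natCast, e1]
      rw [Nat.land_comm, Nat.and_two_pow_sub_one_eq_mod]
      have hmlt : m % 2 ^ k < 2 ^ k := Nat.mod_lt _ (Nat.pos_of_ne_zero (by positivity))
      have hd : 2 ^ k * (m / 2 ^ k) + m % 2 ^ k = m := Nat.div_add_mod m (2 ^ k)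
      have hexp : ((2 ^ k : Nat) : Int) * (-((m / 2 ^ k : Nat) : Int) - 1) =
          -(((2 ^ k * (m / 2 ^ k) : Nat)) : Int) - ((2 ^ k : Nat) : Int) := by push_cast; ring
      have key : (Int.negSucc m) =
          ((2 ^ k - 1 - m % 2 ^ k : Nat) : Int) + (2 : Int) ^ k * (-((m / 2 ^ k : Nat) : Int) - 1) := by
        rw [h2, hexp, Int.negSucc_eq]; omega
      rw [key, Int.add_mul_emod_self_left, Int.emod_eq_of_lt (Int.natCast_nonneg _) ?_]
      rw [h2]
      have : 2 ^ k - 1 - m % 2 ^ k < 2 ^ k := by omega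
      exact_mod_cast this

-- format step at positive width: widening by one column peels the LOW bit off on the right
theorem pv_fmt_step (k : Nat) (w : Nat) :
    pvFormatBin (k + 2) w =
      pvFormatBin (k + 1) (w / 2) ++ [if w % 2 = 1 then '1' else '0'] := by
  match w with
  | 0 =>
      simp [pvFormatBin, List.replicate_succ']
  | 1 =>
      simp [pvFormatBin, pvBinRev, List.replicate_succ']
  | (m+2) =>
      have hrec : pvBinRev (m + 2) =
          (if (m + 2) % 2 = 1 then '1' else '0') :: pvBinRev ((m + 2) / 2) := by
        rw [pvBinRev]
      have hne : (m + 2) / 2 ≠ 0 := by omega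
      simp only [pvFormatBin, if_neg (by omega : ¬m + 2 = 0), if_neg hne, hrec,
        List.reverse_cons, List.length_append, List.length_reverse,
        List.length_cons]
      rw [show (k + 2) - ((pvBinRev ((m+2)/2)).length + (([]:List Char).length + 1)) = (k + 1) - (pvBinRev ((m+2)/2)).length by simp]
      simp [List.append_assoc]

theorem pv_shift_ediv (v : Int) : v >>> (1:Nat) = v / 2 := by
  rw [Int.shiftRight_eq_div_pow]; norm_num

theorem pv_half_mod (p v : Int) (hp : 0 < p) : (v / 2) % p = (v % (p * 2)) / 2 := by
  have h0 : 0 ≤ v % (p * 2) := Int.emod_nonneg v (by positivity)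
  have hlt : v % (p * 2) < p * 2 := Int.emod_lt_of_pos v (by positivity)
  have hv : v = v % (p * 2) + p * (v / (p * 2)) * 2 := by
    have := Int.mul_ediv_add_emod v (p * 2); linarith [this]
  have hdiv : v / 2 = (v % (p * 2)) / 2 + p * (v / (p * 2)) := by
    conv_lhs => rw [hv]
    rw [Int.add_mul_ediv_right _ _ (by norm_num : (2:Int) ≠ 0)]
  rw [hdiv, Int.add_mul_emod_self_left, Int.emod_eq_of_lt (Int.ediv_nonneg h0 (by norm_num)) ?_]
  rw [Int.ediv_lt_iff_lt_mul (by norm_num : (0:Int) < 2)]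
  linarith

theorem pv_band_one_emod (v : Int) : PySem.Int.band v 1 = v % 2 := by
  rw [PySem.Int.band_one, PySem.Int.mod_eq_emod_of_pos (by norm_num : (0:Int) < 2)]

-- main row equivalence at positive width k+1
theorem pv_row_main (k : Nat) (v : Int) :
    pvRowA ((k : Int) + 1) v =
      String.ofList ((pvFormatBin (k + 1) ((v % (2 : Int) ^ (k + 1)).toNat)).map pvTr) := by
  induction k generalizing v with
  | zero =>
      rw [pv_rowA_succ 0 v]
      have hz : pvRowA ((0 : Nat) : Int) (v >>> (1:Nat)) = "" := by
        unfold pvRowA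
        rw [PySem.List.pyRange_one_eq_nil (by norm_num)]
        rfl
      rw [hz, pv_band_one_emod]
      have h2 : (2:Int) ^ (0 + 1) = 2 := by norm_num
      rw [h2]
      rcases Int.emod_two_eq v with h | h <;>
        rw [h] <;> simp [pvFormatBin, pvBinRev, pvTr]
  | succ k ih =>
      have hc : ((k + 1 : Nat) : Int) = (k : Int) + 1 := by push_cast; ring
      rw [pv_rowA_succ (k+1) v, hc, ih (v >>> (1:Nat))]
      have hp : (0:Int) < (2:Int) ^ (k + 1) := by positivity
      have hpow : (2:Int) ^ (k + 1 + 1) = (2:Int) ^ (k + 1) * 2 := by ring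
      have hmod : (v >>> (1:Nat)) % (2:Int) ^ (k + 1) = (v % (2:Int) ^ (k + 1 + 1)) / 2 := by
        rw [pv_shift_ediv, pv_half_mod _ _ hp, hpow]
      have h0 : 0 ≤ v % (2:Int) ^ (k + 1 + 1) := Int.emod_nonneg v (by positivity)
      have htoNat : ((v >>> (1:Nat)) % (2:Int) ^ (k + 1)).toNat
          = (v % (2:Int) ^ (k + 1 + 1)).toNat / 2 := by
        rw [hmod]; omega
      rw [htoNat, pv_fmt_step k]
      have hdvd : (2:Int) ∣ (2:Int) ^ (k + 1 + 1) := ⟨(2:Int) ^ (k+1), by ring⟩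
      have hmm : v % (2:Int) ^ (k + 1 + 1) % 2 = v % 2 := Int.emod_emod_of_dvd v hdvd
      have hband := pv_band_one_emod v
      have hiff : ((v % (2:Int) ^ (k + 1 + 1)).toNat % 2 = 1) ↔ PySem.Int.band v 1 ≠ 0 := by
        rw [hband]; omega
      rcases Classical.em (PySem.Int.band v 1 ≠ 0) with hb | hb
      · rw [if_pos hb, if_pos (hiff.mpr hb)]
        apply String.ext
        simp [pvTr]
      · rw [if_neg hb, if_neg (fun h => hb (hiff.mp h))]
        apply String.ext
        simp [pvTr]

theorem pv_foldl_append_map (l : List Int) (f : Int → String) (acc : List String) :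
    l.foldl (fun answer i => answer ++ [f i]) acc = acc ++ l.map f := by
  induction l generalizing acc with
  | nil => simp
  | cons x xs ih => simp [ih]

-- ===== VERDICT (by name: the statement is the Claim_ definition above) =====
theorem solution_spec : Claim_equal_solution := by
  intro n arr1 arr2 _
  unfold Spec_solution solution solution_alt
  rw [pv_foldl_append_map]
  simp only [List.nil_append, List.map_map]
  by_cases hn : n ≤ 0
  · rw [if_pos hn]
    apply List.map_congr_left
    intro p _
    show pvRowA n (PySem.Int.bor p.1 p.2) = ""
    unfold pvRowA
    rw [PySem.List.pyRange_one_eq_nil hn]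
    rfl
  · rw [if_neg hn]
    obtain ⟨k, hk⟩ : ∃ k, n.toNat = k + 1 := ⟨n.toNat - 1, by omega⟩
    have hn' : n = ((k : Int) + 1) := by omega
    apply List.map_congr_left
    intro p _
    show pvRowA n (PySem.Int.bor p.1 p.2) = _
    rw [hn', show ((k:Int) + 1).toNat = k + 1 by omega, pv_band_mask (k+1) (PySem.Int.bor p.1 p.2)]
    exact pv_row_main k (PySem.Int.bor p.1 p.2)
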